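-- pv_equiv track=rewrite | github.com/ucsdsysnet/Rosebud | fpga_src/accel/ip_matcher/data_analyzer.py | possible_MSBs
-- ===== SOURCE A (Python) =====
-- def possible_MSBs (table, bits):
-- 	prefix = {}
-- 	for x in table:
-- 		k = x[0][0:bits]
-- 		if k in prefix:
-- 			prefix[k].append((x[0][bits:],x[1]))
-- 		else:
-- 			prefix[k]=[(x[0][bits:],x[1])]
-- 	return prefix
-- ===== SOURCE B (Python) =====
-- def possible_MSBs(table, bits):
--     keys = list(dict.fromkeys(x[0][:bits] for x in table))
--     return {k: [(x[0][bits:], x[1]) for x in table if x[0][:bits] == k]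
--             for k in keys}
-- ===== Notes on version B (the rewrite author's own statement) =====
-- stated objective: alternative
-- what changed: A buckets entries into a dict in one pass with an in-place append-or-create branch; B first computes the ordered list of distinct prefixes, then builds each group by an independent filtering pass over the table.
import Mathlib
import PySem

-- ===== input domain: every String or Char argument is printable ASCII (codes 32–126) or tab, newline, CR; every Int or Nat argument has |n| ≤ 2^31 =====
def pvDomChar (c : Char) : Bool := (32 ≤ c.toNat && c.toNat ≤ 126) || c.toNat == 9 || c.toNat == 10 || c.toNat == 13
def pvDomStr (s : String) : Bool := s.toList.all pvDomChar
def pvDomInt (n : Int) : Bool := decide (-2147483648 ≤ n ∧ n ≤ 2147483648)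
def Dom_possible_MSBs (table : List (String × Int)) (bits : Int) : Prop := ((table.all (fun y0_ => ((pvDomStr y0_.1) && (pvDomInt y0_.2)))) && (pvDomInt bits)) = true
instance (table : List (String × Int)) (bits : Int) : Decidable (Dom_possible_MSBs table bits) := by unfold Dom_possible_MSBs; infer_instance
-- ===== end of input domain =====

-- B replaces A's one-pass dict bucketing by an ordered-distinct-prefix pass followed by
-- one filtering pass per prefix; same return value, no speed claim.

-- ===== PORT A =====
def possible_MSBs (table : List (String × Int)) (bits : Int) : List (String × List (String × Int)) :=
  (table.foldl
    (fun prefix_ x =>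
      let k := PySem.Str.slice x.1 (some 0) (some bits)
      if prefix_.contains k then
        prefix_.modify k [] (fun l => l ++ [(PySem.Str.slice x.1 (some bits) none, x.2)])
      else
        prefix_.insert k [(PySem.Str.slice x.1 (some bits) none, x.2)])
    PySem.Dict.empty).items

-- ===== PORT B =====
def possible_MSBs_alt (table : List (String × Int)) (bits : Int) : List (String × List (String × Int)) :=
  let keys := PySem.List.dedup (table.map (fun x => PySem.Str.slice x.1 (some 0) (some bits)))
  keys.map (fun k =>
    (k, (table.filter (fun x => PySem.Str.slice x.1 (some 0) (some bits) == k)).map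
          (fun x => (PySem.Str.slice x.1 (some bits) none, x.2))))

-- ===== PRECONDITION & SPEC =====
def Spec_possible_MSBs (table : List (String × Int)) (bits : Int) (out : List (String × List (String × Int))) : Prop := out = possible_MSBs_alt table bits
instance (table : List (String × Int)) (bits : Int) (out : List (String × List (String × Int))) : Decidable (Spec_possible_MSBs table bits out) := by unfold Spec_possible_MSBs; infer_instance

-- ===== CLAIM (what is proved, stated in full; the proofs are below) =====
def Claim_equal_possible_MSBs : Prop := ∀ (table : List (String × Int)) (bits : Int), Dom_possible_MSBs table bits → Spec_possible_MSBs table bits (possible_MSBs table bits)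

-- ===== LEMMAS AND PROOFS =====

-- A's if-contains-then-append-else-create step IS Dict.modify with default [].
lemma step_eq_modify (d : PySem.Dict String (List (String × Int))) (k : String)
    (v : String × Int) :
    (if d.contains k then d.modify k [] (fun l => l ++ [v]) else d.insert k [v])
      = d.modify k [] (fun l => l ++ [v]) := by
  by_cases h : d.contains k
  · simp [h]
  · simp only [h, if_neg]
    simp [PySem.Dict.modify, PySem.Dict.getD_of_not_contains,
      (Bool.not_eq_true _).mp h]

-- A dict with Nodup keys is its keys paired with their getD values.
lemma items_eq_keys_map (d : PySem.Dict String (List (String × Int)))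
    (h : d.keys.Nodup) :
    d.items = d.keys.map (fun k => (k, d.getD k [])) := by
  simp only [PySem.Dict.keys, List.map_map]
  refine ((List.map_id d.items).symm.trans (List.map_congr_left ?_))
  intro p hp
  have := PySem.Dict.getD_of_mem_items (k := p.1) (v := p.2) (d := d)
    (d0 := ([] : List (String × Int))) (Prod.mk.eta ▸ hp) h
  simp [Function.comp, this]

-- The bucketing fold, in its Dict.modify form (the two branches of A collapse by step_eq_modify).
lemma fold_eq (table : List (String × Int)) (bits : Int) :
    (table.foldl
      (fun prefix_ x =>
        let k := PySem.Str.slice x.1 (some 0) (some bits)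
        if prefix_.contains k then
          prefix_.modify k [] (fun l => l ++ [(PySem.Str.slice x.1 (some bits) none, x.2)])
        else
          prefix_.insert k [(PySem.Str.slice x.1 (some bits) none, x.2)])
      PySem.Dict.empty)
    = table.foldl
        (fun d x => d.modify (PySem.Str.slice x.1 (some 0) (some bits)) []
            (fun l => l ++ [(PySem.Str.slice x.1 (some bits) none, x.2)]))
        PySem.Dict.empty := by
  congr 1
  funext d x
  exact step_eq_modify d _ _

lemma keys_fold (table : List (String × Int)) (bits : Int) :
    (table.foldl
        (fun d x => d.modify (PySem.Str.slice x.1 (some 0) (some bits)) []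
            (fun l => l ++ [(PySem.Str.slice x.1 (some bits) none, x.2)]))
        PySem.Dict.empty).keys
    = PySem.List.dedup (table.map (fun x => PySem.Str.slice x.1 (some 0) (some bits))) := by
  rw [PySem.Dict.keys_foldl_modify_key]
  simp [PySem.List.dedup_eq_ofList]
  rfl

lemma getD_fold (table : List (String × Int)) (bits : Int) (k : String) :
    (table.foldl
        (fun d x => d.modify (PySem.Str.slice x.1 (some 0) (some bits)) []
            (fun l => l ++ [(PySem.Str.slice x.1 (some bits) none, x.2)]))
        PySem.Dict.empty).getD k []
    = (table.filter (fun x => PySem.Str.slice x.1 (some 0) (some bits) == k)).map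
          (fun x => (PySem.Str.slice x.1 (some bits) none, x.2)) := by
  have hm : table.foldl
        (fun d x => d.modify (PySem.Str.slice x.1 (some 0) (some bits)) []
            (fun l => l ++ [(PySem.Str.slice x.1 (some bits) none, x.2)]))
        PySem.Dict.empty
      = (table.map (fun x => (PySem.Str.slice x.1 (some 0) (some bits),
          (PySem.Str.slice x.1 (some bits) none, x.2)))).foldl
          (fun d p => d.modify p.1 [] (fun l => l ++ [p.2])) PySem.Dict.empty := by
    rw [List.foldl_map]
  rw [hm, PySem.Dict.getD_foldl_modify_append]
  simp [List.filter_map, Function.comp_def]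

-- ===== VERDICT (by name: the statement is the Claim_ definition above) =====
theorem possible_MSBs_spec : Claim_equal_possible_MSBs := by
  intro table bits _
  show possible_MSBs table bits = possible_MSBs_alt table bits
  unfold possible_MSBs possible_MSBs_alt
  rw [fold_eq]
  rw [items_eq_keys_map _ (PySem.Dict.nodup_keys_foldl_modify_key _ _ _ _ _
        PySem.Dict.nodup_keys_empty)]
  rw [keys_fold]
  exact List.map_congr_left (fun k _ => by rw [getD_fold])
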